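-- pv_equiv track=rewrite | github.com/prasad354/codespace | grocery.py | generate_grocery_list
-- ===== SOURCE A (Python) =====
-- def generate_grocery_list(items):
--     # Convert items to uppercase and count occurrences
--     grocery_dict = {}
--     for item in items:
--         item = item.strip().lower()  # Convert to lowercase and remove leading/trailing whitespace
--         grocery_dict[item] = grocery_dict.get(item, 0) + 1
--
--     # Sort the grocery list alphabetically
--     sorted_items = sorted(grocery_dict.items())
--
--     # Format and return the grocery list
--     grocery_list = []
--     for item, count in sorted_items:
--         grocery_list.append(f"{count} {item.upper()}")
--     return grocery_list
-- ===== SOURCE B (Python) =====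
-- import itertools
--
-- def generate_grocery_list(items):
--     # Normalize, sort, then count consecutive runs with groupby (no frequency dict).
--     normalized = sorted(item.strip().lower() for item in items)
--     result = []
--     for key, group in itertools.groupby(normalized):
--         result.append(f"{sum(1 for _ in group)} {key.upper()}")
--     return result
-- ===== Notes on version B (the rewrite author's own statement) =====
-- stated objective: idiomatic
-- what changed: Replaced the frequency-dict accumulation plus sort-of-items with a normalize-then-sort pass whose counts are read off as consecutive run lengths via itertools.groupby (no dict at all).
import Mathlib
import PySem

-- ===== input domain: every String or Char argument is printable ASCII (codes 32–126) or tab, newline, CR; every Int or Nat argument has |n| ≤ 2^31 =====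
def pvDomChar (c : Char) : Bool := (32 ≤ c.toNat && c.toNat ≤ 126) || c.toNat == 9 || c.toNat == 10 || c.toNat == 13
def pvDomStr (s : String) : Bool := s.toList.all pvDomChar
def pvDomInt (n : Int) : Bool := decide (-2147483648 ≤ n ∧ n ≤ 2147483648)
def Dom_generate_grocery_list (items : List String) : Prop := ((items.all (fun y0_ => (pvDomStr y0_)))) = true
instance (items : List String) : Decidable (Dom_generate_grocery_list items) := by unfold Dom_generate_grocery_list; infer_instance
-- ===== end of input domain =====

-- B replaces A's frequency-dict accumulation + sort of the dict items by a normalize-then-sort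
-- pass whose counts are read off as consecutive run lengths (itertools.groupby); same result, no dict.

-- ===== PORT A =====
def generate_grocery_list (items : List String) : List String :=
  let grocery_dict : PySem.Dict String Int :=
    items.foldl (fun d item0 =>
      let item := PySem.Str.lower (PySem.Str.strip item0)
      d.insert item (d.getD item 0 + 1)) PySem.Dict.empty
  let sorted_items := PySem.List.sorted2 grocery_dict.items (fun p => p.1) (fun p => p.2) false
  sorted_items.foldl (fun gl p => gl ++ [PySem.Int.toStr p.2 ++ " " ++ PySem.Str.upper p.1]) []

-- ===== PORT B =====
def pvNorm (item : String) : String := PySem.Str.lower (PySem.Str.strip item)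

-- itertools.groupby over the (already sorted) list: one (key, run-length) pair per maximal run
def pvRuns (s : List String) : List (String × Nat) :=
  match s with
  | [] => []
  | x :: t =>
      (x, 1 + (t.takeWhile (fun y => y == x)).length) :: pvRuns (t.dropWhile (fun y => y == x))
termination_by s.length
decreasing_by
  simp only [List.length_cons]
  exact Nat.lt_succ_of_le (List.length_dropWhile_le _ _)

def generate_grocery_list_alt (items : List String) : List String :=
  let normalized := PySem.List.sorted (items.map pvNorm) (fun x => x) false
  (pvRuns normalized).map (fun kc => PySem.Int.toStr (kc.2 : Int) ++ " " ++ PySem.Str.upper kc.1)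

-- ===== PRECONDITION & SPEC =====
def Spec_generate_grocery_list (items : List String) (out : List String) : Prop := out = generate_grocery_list_alt items
instance (items : List String) (out : List String) : Decidable (Spec_generate_grocery_list items out) := by unfold Spec_generate_grocery_list; infer_instance

-- ===== CLAIM (what is proved, stated in full; the proofs are below) =====
def Claim_equal_generate_grocery_list : Prop := ∀ (items : List String), Dom_generate_grocery_list items → Spec_generate_grocery_list items (generate_grocery_list items)

-- ===== LEMMAS AND PROOFS =====

-- insertBy only looks at `before` on the inserted element versus list members
theorem pv_insertBy_congr {α : Type} (p q : α → α → Bool) (x : α) (ys : List α)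
    (h : ∀ y ∈ ys, p x y = q x y) :
    PySem.List.insertBy p x ys = PySem.List.insertBy q x ys := by
  induction ys with
  | nil => rfl
  | cons y ys ih =>
    simp only [PySem.List.insertBy]
    rw [h y (by simp)]
    by_cases hq : q x y = true
    · simp [hq]
    · simp [hq, ih (fun z hz => h z (by simp [hz]))]

-- a foldl of insertBy only looks at `before` on members of xs ++ acc
theorem pv_foldl_insertBy_congr {α : Type} (p q : α → α → Bool) (xs acc : List α)
    (h : ∀ a ∈ xs ++ acc, ∀ b ∈ xs ++ acc, p a b = q a b) :
    xs.foldl (fun acc x => PySem.List.insertBy p x acc) acc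
      = xs.foldl (fun acc x => PySem.List.insertBy q x acc) acc := by
  induction xs generalizing acc with
  | nil => rfl
  | cons x xs ih =>
    simp only [List.foldl_cons]
    rw [pv_insertBy_congr p q x acc (fun y hy => h x (by simp) y (by simp [hy]))]
    apply ih
    intro a ha b hb
    simp only [List.mem_append, PySem.List.mem_insertBy] at ha hb
    apply h <;> simp only [List.mem_cons, List.mem_append]
    · rcases ha with h | h | h <;> simp [h]
    · rcases hb with h | h | h <;> simp [h]

-- when the first key is injective on the list, Python's tuple sort is a sort by the first key
theorem pv_sorted2_eq_sorted (xs : List (String × Int))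
    (hinj : ∀ a ∈ xs, ∀ b ∈ xs, a.1 = b.1 → a = b) :
    PySem.List.sorted2 xs (fun p => p.1) (fun p => p.2) false
      = PySem.List.sorted xs (fun p => p.1) false := by
  simp only [PySem.List.sorted2, PySem.List.sorted, if_neg (by decide : ¬ (false = true))]
  apply pv_foldl_insertBy_congr
  intro a ha b hb
  simp only [List.append_nil] at ha hb
  by_cases h1 : a.1 < b.1
  · simp [h1]
  · by_cases h2 : b.1 < a.1
    · simp [h1, h2]
    · have : a = b := hinj a ha b hb (le_antisymm (not_lt.mp h2) (not_lt.mp h1))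
      subst this
      simp

-- grouping a sorted list: strictly increasing keys, one per distinct element, paired with its count
theorem pv_runs_sorted (s : List String) (hs : s.Pairwise (· ≤ ·)) :
    ∃ ks : List String, ks.Pairwise (· < ·) ∧ (∀ k, k ∈ ks ↔ k ∈ s) ∧
      pvRuns s = ks.map (fun k => (k, s.count k)) := by
  induction s using pvRuns.induct with
  | case1 => exact ⟨[], by simp, by simp, by rw [pvRuns]; rfl⟩
  | case2 x t ih =>
    rw [List.pairwise_cons] at hs
    obtain ⟨hx, ht⟩ := hs
    set t1 := t.takeWhile (fun y => y == x) with ht1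
    set t2 := t.dropWhile (fun y => y == x) with ht2
    have htsplit : t1 ++ t2 = t := List.takeWhile_append_dropWhile
    have h1 : ∀ y ∈ t1, y = x := by
      intro y hy
      have := List.mem_takeWhile_imp hy
      exact eq_of_beq this
    have ht2p : t2.Pairwise (· ≤ ·) := ht.sublist (List.dropWhile_sublist _)
    have hlt : ∀ z ∈ t2, x < z := by
      intro z hz
      cases heq : t2 with
      | nil => rw [heq] at hz; cases hz
      | cons y r =>
        have hyne : ¬ (y == x) = true := by
          have h0 := List.head?_dropWhile_not (fun y => y == x) t
          rw [← ht2, heq] at h0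
          simpa using h0
        have hyx : x < y := lt_of_le_of_ne (hx y (by rw [← htsplit, heq]; simp)) (by simpa [eq_comm] using (by simpa using hyne : y ≠ x))
        rw [heq] at hz
        rcases List.mem_cons.mp hz with rfl | hzr
        · exact hyx
        · have : y ≤ z := (List.pairwise_cons.mp (heq ▸ ht2p)).1 z hzr
          exact lt_of_lt_of_le hyx this
    obtain ⟨ks2, hks2lt, hks2mem, hks2runs⟩ := ih ht2p
    refine ⟨x :: ks2, ?_, ?_, ?_⟩
    · rw [List.pairwise_cons]
      exact ⟨fun k hk => hlt k ((hks2mem k).mp hk), hks2lt⟩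
    · intro k
      simp only [List.mem_cons, hks2mem]
      constructor
      · rintro (rfl | hk)
        · exact .inl rfl
        · exact .inr (by rw [← htsplit]; exact List.mem_append_right _ hk)
      · rintro (rfl | hk)
        · exact .inl rfl
        · rw [← htsplit] at hk
          rcases List.mem_append.mp hk with h | h
          · exact .inl (h1 k h)
          · exact .inr h
    · rw [pvRuns]
      simp only [← ht1, ← ht2]
      rw [hks2runs, List.map_cons]
      congr 1
      · -- head: the count of x in x :: t is 1 + t1.length
        have hcx1 : t1.count x = t1.length := List.count_eq_length.mpr (fun b hb => by rw [h1 b hb])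
        have hcx2 : t2.count x = 0 := List.count_eq_zero.mpr (fun hmem => lt_irrefl x (hlt x hmem))
        have : (x :: t).count x = 1 + t1.length := by
          rw [← htsplit]
          simp [List.count_append, hcx1, hcx2]
          omega
        rw [this]
      · -- tail: counts in t2 agree with counts in x :: t for keys of ks2
        apply List.map_congr_left
        intro k hk
        have hkt2 : k ∈ t2 := (hks2mem k).mp hk
        have hkx : x < k := hlt k hkt2
        have hcx1 : t1.count k = 0 := List.count_eq_zero.mpr (fun hmem => lt_irrefl x (by rw [h1 k hmem] at hkx; exact hkx))
        have : (x :: t).count k = t2.count k := by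
          rw [← htsplit]
          simp [List.count_append, hcx1, Ne.symm (ne_of_gt hkx)]
        rw [this]

-- ===== VERDICT (by name: the statement is the Claim_ definition above) =====
theorem generate_grocery_list_spec : Claim_equal_generate_grocery_list := by
  intro items _dom
  unfold Spec_generate_grocery_list generate_grocery_list generate_grocery_list_alt
  set norm := items.map pvNorm with hnorm
  set s := PySem.List.sorted norm (fun x => x) false with hsdef
  have hs : s.Pairwise (· ≤ ·) := by simpa using PySem.List.sorted_pairwise norm (fun x => x)
  obtain ⟨ks, hklt, hkmem, hruns⟩ := pv_runs_sorted s hs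
  have hknodup : ks.Nodup := hklt.imp (fun h => ne_of_lt h)
  have hperm : ks.Perm (PySem.Set.ofList norm) := by
    rw [List.perm_ext_iff_of_nodup hknodup (PySem.Set.nodup_ofList norm)]
    intro k
    rw [hkmem k, PySem.Set.mem_ofList, hsdef, PySem.List.mem_sorted]
  have hcnt : ∀ k, List.count k s = List.count k norm :=
    fun k => (PySem.List.sorted_perm norm (fun x => x) false).count_eq k
  have hdict : (items.foldl (fun d item0 =>
      let item := PySem.Str.lower (PySem.Str.strip item0)
      d.insert item (d.getD item 0 + 1)) PySem.Dict.empty) = PySem.Dict.counter norm := by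
    rw [hnorm, ← PySem.Dict.foldl_insert_getD_add_one_eq_counter, List.foldl_map]
    rfl
  simp only [hdict, PySem.Dict.items_counter]
  have hinj : ∀ a ∈ (PySem.Set.ofList norm).map (fun k => (k, (List.count k norm : Int))),
      ∀ b ∈ (PySem.Set.ofList norm).map (fun k => (k, (List.count k norm : Int))), a.1 = b.1 → a = b := by
    intro a ha b hb hab
    obtain ⟨k1, _, rfl⟩ := List.mem_map.mp ha
    obtain ⟨k2, _, rfl⟩ := List.mem_map.mp hb
    simp only at hab
    subst hab
    rfl
  simp only [pv_sorted2_eq_sorted _ hinj]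
  simp only [PySem.List.sorted_eq_of_perm_of_pairwise_lt _ (ks.map (fun k => (k, (List.count k norm : Int))))
        (fun p => p.1) (hperm.map _)
        (List.pairwise_map.mpr (hklt.imp (fun h => by simpa using h)))]
  simp only [PySem.List.foldl_append_singleton_eq_map, hruns]
  simp only [List.nil_append, List.map_map, Function.comp_def, hcnt]
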